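-- pv_equiv track=rewrite | github.com/ermantatar/Algorithms | Python/_____COMPANY_LIST_____/PAST_INTERVIEWS/SmithRX.py | solution
-- ===== SOURCE A (Python) =====
-- from collections import defaultdict
--
-- ACCOUNT_A = "A"
--
-- ACCOUNT_B = "B"
--
-- def solution(R, V):
--     # write your code in Python 3.6
--     if not R or not V:
--         return []
--     if len(R) != len(V): return []
--
--     accounts = defaultdict(int)
--     accounts[ACCOUNT_A] = 0
--     accounts[ACCOUNT_B] = 0
--
--     lowest = defaultdict(int)
--     lowest[ACCOUNT_A] = 0
--     lowest[ACCOUNT_B] = 0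
--
--     for recipient, amount in zip(list(R.upper()), V):
--         sender = ACCOUNT_B if recipient == ACCOUNT_A else ACCOUNT_A
--
--         # transfer
--         accounts[sender] = accounts.get(sender, 0) - amount
--         lowest[sender] = min(lowest[sender], accounts[sender])
--
--         accounts[recipient] = accounts.get(recipient, 0) + amount
--         # check the lowest
--
--     return [abs(lowest.get(ACCOUNT_A, 0)), abs(lowest.get(ACCOUNT_B, 0))]
-- ===== SOURCE B (Python) =====
-- def _prefix_sums(xs):
--     out = []
--     s = 0
--     for x in xs:
--         s += x
--         out.append(s)
--     return out
--
-- def solution(R, V):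
--     if not R or not V or len(R) != len(V):
--         return []
--     cs = R.upper()
--     delta_a = [v if c == 'A' else -v for c, v in zip(cs, V)]
--     delta_b = [v if c == 'B' else (-v if c == 'A' else 0) for c, v in zip(cs, V)]
--     pa = _prefix_sums(delta_a)
--     pb = _prefix_sums(delta_b)
--     # account X's lowest is only sampled right after X sends (A sends unless recipient is 'A')
--     low_a = min([0] + [p for c, p in zip(cs, pa) if c != 'A'])
--     low_b = min([0] + [p for c, p in zip(cs, pb) if c == 'A'])
--     return [abs(low_a), abs(low_b)]
-- ===== Notes on version B (the rewrite author's own statement) =====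
-- stated objective: alternative
-- what changed: Replaces the interleaved dict-based running-balance-and-minimum loop with materialized signed-delta lists and their prefix sums, reducing each account's lowest with min over its sender positions only.
import Mathlib
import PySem

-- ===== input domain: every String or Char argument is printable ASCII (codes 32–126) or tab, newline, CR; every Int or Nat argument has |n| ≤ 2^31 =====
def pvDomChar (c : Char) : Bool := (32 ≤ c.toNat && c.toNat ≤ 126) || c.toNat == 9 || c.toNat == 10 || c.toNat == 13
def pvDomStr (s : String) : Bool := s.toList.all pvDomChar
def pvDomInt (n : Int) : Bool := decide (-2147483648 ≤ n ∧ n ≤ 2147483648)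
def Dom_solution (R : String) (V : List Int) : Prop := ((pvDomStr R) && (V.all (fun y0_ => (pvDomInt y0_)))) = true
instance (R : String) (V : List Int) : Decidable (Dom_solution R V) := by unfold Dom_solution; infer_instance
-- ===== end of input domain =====

-- B replaces A's interleaved dict-based balance-and-minimum loop by materializing signed-delta
-- lists and their prefix sums, then reducing with min over the sender positions (objective: alternative).

-- ===== PORT A =====
-- the body of A's for-loop over zip(R.upper(), V), acting on (accounts, lowest)
def solStepA (st : PySem.Dict String Int × PySem.Dict String Int) (p : Char × Int) :
    PySem.Dict String Int × PySem.Dict String Int :=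
  let accounts := st.1
  let lowest := st.2
  let recipient := String.ofList [p.1]
  let sender := if recipient = "A" then "B" else "A"
  let accounts := accounts.insert sender (accounts.getD sender 0 - p.2)
  let lowest := lowest.insert sender (min (lowest.getD sender 0) (accounts.getD sender 0))
  let accounts := accounts.insert recipient (accounts.getD recipient 0 + p.2)
  (accounts, lowest)

def solution (R : String) (V : List Int) : List Int :=
  if R.toList = [] ∨ V = [] then []
  else if PySem.Str.len R ≠ (V.length : Int) then []
  else
    let accounts0 : PySem.Dict String Int := ((PySem.Dict.empty).insert "A" 0).insert "B" 0
    let lowest0 : PySem.Dict String Int := ((PySem.Dict.empty).insert "A" 0).insert "B" 0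
    let st := (List.zip (PySem.Str.upper R).toList V).foldl solStepA (accounts0, lowest0)
    [|st.2.getD "A" 0|, |st.2.getD "B" 0|]

-- ===== PORT B =====
-- _prefix_sums from Source B: running-sum materialization
def prefixSums (s : Int) : List Int → List Int
  | [] => []
  | x :: xs => (s + x) :: prefixSums (s + x) xs

def solution_alt (R : String) (V : List Int) : List Int :=
  if R.toList = [] ∨ V = [] ∨ R.toList.length ≠ V.length then []
  else
    let cs := (PySem.Str.upper R).toList
    let zs := List.zip cs V
    let deltaA := zs.map (fun p => if p.1 = 'A' then p.2 else -p.2)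
    let deltaB := zs.map (fun p => if p.1 = 'B' then p.2 else if p.1 = 'A' then -p.2 else 0)
    let pa := prefixSums 0 deltaA
    let pb := prefixSums 0 deltaB
    let lowA := (((List.zip cs pa).filter (fun q => q.1 ≠ 'A')).map Prod.snd).foldl min 0
    let lowB := (((List.zip cs pb).filter (fun q => q.1 = 'A')).map Prod.snd).foldl min 0
    [|lowA|, |lowB|]

-- ===== PRECONDITION & SPEC =====
def Spec_solution (R : String) (V : List Int) (out : List Int) : Prop := out = solution_alt R V
instance (R : String) (V : List Int) (out : List Int) : Decidable (Spec_solution R V out) := by unfold Spec_solution; infer_instance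

-- ===== CLAIM (what is proved, stated in full; the proofs are below) =====
def Claim_equal_solution : Prop := ∀ (R : String) (V : List Int), Dom_solution R V → Spec_solution R V (solution R V)

-- ===== LEMMAS AND PROOFS =====

-- proof-only abstraction of A's step on the four numbers the answer depends on:
-- (balance A, balance B, lowest A, lowest B)
def pstep (s : Int × Int × Int × Int) (p : Char × Int) : Int × Int × Int × Int :=
  if p.1 = 'A' then (s.1 + p.2, s.2.1 - p.2, s.2.2.1, min (s.2.2.2) (s.2.1 - p.2))
  else if p.1 = 'B' then (s.1 - p.2, s.2.1 + p.2, min (s.2.2.1) (s.1 - p.2), s.2.2.2)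
  else (s.1 - p.2, s.2.1, min (s.2.2.1) (s.1 - p.2), s.2.2.2)

lemma mkA_iff (c : Char) : (String.ofList [c] = "A") ↔ c = 'A' := by
  constructor
  · intro h; have := congrArg String.toList h; simpa using this
  · rintro rfl; rfl

lemma mkB_iff (c : Char) : (String.ofList [c] = "B") ↔ c = 'B' := by
  constructor
  · intro h; have := congrArg String.toList h; simpa using this
  · rintro rfl; rfl

-- A's dict fold, projected to the four tracked numbers, equals the pure fold
lemma dict_fold_abs (zs : List (Char × Int)) :
    ∀ (acc low : PySem.Dict String Int),
    (let st := zs.foldl solStepA (acc, low)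
     (st.1.getD "A" 0, st.1.getD "B" 0, st.2.getD "A" 0, st.2.getD "B" 0))
    = zs.foldl pstep (acc.getD "A" 0, acc.getD "B" 0, low.getD "A" 0, low.getD "B" 0) := by
  induction zs with
  | nil => intro acc low; simp
  | cons p zs ih =>
    intro acc low
    obtain ⟨c, v⟩ := p
    simp only [List.foldl_cons]
    by_cases hA : c = 'A'
    · subst hA
      rw [ih]
      simp [solStepA, pstep, PySem.Dict.getD_insert]
    · have hs : String.ofList [c] ≠ "A" := fun h => hA ((mkA_iff c).1 h)
      have hs' : ("A" : String) ≠ String.ofList [c] := fun h => hs h.symm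
      by_cases hB : c = 'B'
      · subst hB
        rw [ih]
        simp [solStepA, pstep, PySem.Dict.getD_insert]
      · have hsB : String.ofList [c] ≠ "B" := fun h => hB ((mkB_iff c).1 h)
        have hsB' : ("B" : String) ≠ String.ofList [c] := fun h => hsB h.symm
        rw [ih]
        simp [solStepA, pstep, hA, hB, hs, hs', hsB', PySem.Dict.getD_insert]

-- the pure fold is exactly B's prefix-sums-then-filtered-min computation
lemma pstep_fold_eq (zs : List (Char × Int)) :
    ∀ (aA aB lA lB : Int),
    zs.foldl pstep (aA, aB, lA, lB)
    = (aA + (zs.map (fun p => if p.1 = 'A' then p.2 else -p.2)).sum,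
       aB + (zs.map (fun p => if p.1 = 'B' then p.2 else if p.1 = 'A' then -p.2 else 0)).sum,
       (((List.zip (zs.map Prod.fst)
            (prefixSums aA (zs.map (fun p => if p.1 = 'A' then p.2 else -p.2)))).filter
            (fun q => q.1 ≠ 'A')).map Prod.snd).foldl min lA,
       (((List.zip (zs.map Prod.fst)
            (prefixSums aB (zs.map (fun p => if p.1 = 'B' then p.2 else if p.1 = 'A' then -p.2 else 0)))).filter
            (fun q => q.1 = 'A')).map Prod.snd).foldl min lB) := by
  induction zs with
  | nil => intro aA aB lA lB; simp
  | cons p zs ih =>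
    intro aA aB lA lB
    by_cases hA : p.1 = 'A'
    · simp only [List.foldl_cons, List.map_cons, pstep, hA, if_true, prefixSums,
        List.zip_cons_cons, List.filter_cons]
      rw [ih]
      simp [add_assoc, sub_eq_add_neg]
    · by_cases hB : p.1 = 'B'
      · have hA' : p.1 ≠ 'A' := hA
        simp only [List.foldl_cons, List.map_cons, pstep, hB, if_true, prefixSums,
          List.zip_cons_cons, List.filter_cons]
        rw [ih]
        simp [hA, add_assoc, sub_eq_add_neg]
      · simp only [List.foldl_cons, List.map_cons, pstep, hA, hB, if_false, prefixSums,
          List.zip_cons_cons, List.filter_cons]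
        rw [ih]
        simp [hA, add_assoc, sub_eq_add_neg]

-- ===== VERDICT (by name: the statement is the Claim_ definition above) =====
theorem solution_spec : Claim_equal_solution := by
  intro R V _
  show solution R V = solution_alt R V
  unfold solution solution_alt
  by_cases h1 : R.toList = [] ∨ V = []
  · rcases h1 with h | h <;> simp [h]
  · push_neg at h1
    have hlen : PySem.Str.len R = (R.toList.length : Int) := PySem.Str.len_eq R
    by_cases h2 : R.toList.length = V.length
    · have hg1 : ¬ (R.toList = [] ∨ V = []) := by simp [h1.1, h1.2]
      have hg2 : ¬ (PySem.Str.len R ≠ (V.length : Int)) := by simp [h2]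
      have hg3 : ¬ (R.toList = [] ∨ V = [] ∨ R.toList.length ≠ V.length) := by
        simp [h1.1, h1.2, h2]
      rw [if_neg hg1, if_neg hg2, if_neg hg3]
      have habs := dict_fold_abs ((PySem.Chars.upper R.toList).zip V)
        (((PySem.Dict.empty).insert "A" 0).insert "B" 0)
        (((PySem.Dict.empty).insert "A" 0).insert "B" 0)
      have hpure := pstep_fold_eq ((PySem.Chars.upper R.toList).zip V) 0 0 0 0
      have hulen : (PySem.Chars.upper R.toList).length = R.toList.length := by
        simp [PySem.Chars.upper]
      have hfst : ((PySem.Chars.upper R.toList).zip V).map Prod.fst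
          = PySem.Chars.upper R.toList := by
        apply List.map_fst_zip; omega
      simp [PySem.Dict.getD_insert] at habs
      rw [hpure] at habs
      simp [hfst] at habs
      obtain ⟨-, -, h3, h4⟩ := habs
      simp [PySem.Str.toList_upper, h3, h4]
    · have hg2 : PySem.Str.len R ≠ (V.length : Int) := by
        rw [hlen]; exact fun h => h2 (by exact_mod_cast h)
      rw [if_neg (by simp [h1.1, h1.2]), if_pos hg2,
        if_pos (Or.inr (Or.inr h2))]
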